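-- pv_equiv track=rewrite | github.com/PeddintiKusuma/GFG_problems | Difficulty: Basic/Alternative Sorting/alternative-sorting.py | alternateSort
-- ===== SOURCE A (Python) =====
-- def alternateSort(arr):
--     # Your code goes here
--     n=len(arr)
--     arr2=[]
--     left=0
--     right=n-1
--     arr.sort()
--     while left<=right:
--         if left!=right:
--             arr2.append(arr[right])
--             arr2.append(arr[left])
--         else:
--             arr2.append(arr[left])
--         right=right-1
--         left=left+1
--     return arr2
-- ===== SOURCE B (Python) =====
-- def alternateSort(arr):
--     arr.sort()
--     n = len(arr)
--     h = n // 2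
--     low = arr[:h]
--     high = arr[n - h:][::-1]
--     out = []
--     for hi, lo in zip(high, low):
--         out.append(hi)
--         out.append(lo)
--     if n % 2 == 1:
--         out.append(arr[h])
--     return out
-- ===== Notes on version B (the rewrite author's own statement) =====
-- stated objective: simpler
-- what changed: Instead of advancing two pointers over the sorted array in a while loop, B slices the sorted array into a low half and a reversed high half and interleaves them with one zip loop, appending the middle element once for odd length.
import Mathlib
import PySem

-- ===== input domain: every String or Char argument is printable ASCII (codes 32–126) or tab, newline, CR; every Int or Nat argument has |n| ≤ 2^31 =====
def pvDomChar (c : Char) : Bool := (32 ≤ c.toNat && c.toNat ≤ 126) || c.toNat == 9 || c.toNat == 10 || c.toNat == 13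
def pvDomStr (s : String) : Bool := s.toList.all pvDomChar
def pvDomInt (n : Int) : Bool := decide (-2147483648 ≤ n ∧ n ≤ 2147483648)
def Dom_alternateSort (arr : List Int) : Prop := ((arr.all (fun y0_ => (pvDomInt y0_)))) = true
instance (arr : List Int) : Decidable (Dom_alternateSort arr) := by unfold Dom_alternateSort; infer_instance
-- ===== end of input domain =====

-- B replaces A's two-pointer while loop by slicing the sorted list into a low half and a
-- reversed high half and interleaving them with one zip loop (simpler decomposition).
-- Both Pythons sort arr in place; the equivalence proved here is about the return value.

-- ===== PORT A =====
-- A's while loop: consumes the segment [left, right] of the sorted list, two ends per step.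
def alternateSortLoop (s : List Int) (left right : Int) : List Int :=
  if _h : left ≤ right then
    if left ≠ right then
      PySem.List.pyGetD s right 0 :: PySem.List.pyGetD s left 0 ::
        alternateSortLoop s (left + 1) (right - 1)
    else [PySem.List.pyGetD s left 0]
  else []
termination_by (right + 1 - left).toNat
decreasing_by omega

def alternateSort (arr : List Int) : List Int :=
  let n : Int := arr.length
  let sorted := PySem.List.sorted arr (fun x => x) false
  alternateSortLoop sorted 0 (n - 1)

-- ===== PORT B =====
def alternateSort_alt (arr : List Int) : List Int :=
  let s := PySem.List.sorted arr (fun x => x) false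
  let n : Int := s.length
  let h := PySem.Int.floordiv n 2
  let low := PySem.List.slice s none (some h)
  -- arr[n-h:][::-1] : slice then reverse (PySem.List.slice?_none_none_neg_one)
  let high := (PySem.List.slice s (some (n - h)) none).reverse
  let out := (high.zip low).foldl (fun acc p => acc ++ [p.1, p.2]) []
  if PySem.Int.mod n 2 == 1 then out ++ [PySem.List.pyGetD s h 0] else out

-- ===== PRECONDITION & SPEC =====
def Spec_alternateSort (arr : List Int) (out : List Int) : Prop := out = alternateSort_alt arr
instance (arr : List Int) (out : List Int) : Decidable (Spec_alternateSort arr out) := by unfold Spec_alternateSort; infer_instance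

-- ===== CLAIM (what is proved, stated in full; the proofs are below) =====
def Claim_equal_alternateSort : Prop := ∀ (arr : List Int), Dom_alternateSort arr → Spec_alternateSort arr (alternateSort arr)

-- ===== LEMMAS AND PROOFS =====

-- Both-ends peel of a list: the common shape of both algorithms.
def coreSeg : List Int → List Int
  | [] => []
  | a :: rest =>
    if h : rest = [] then [a]
    else rest.getLast h :: a :: coreSeg rest.dropLast
termination_by l => l.length
decreasing_by simp

theorem coreSeg_nil : coreSeg [] = [] := by simp [coreSeg]

theorem coreSeg_single (a : Int) : coreSeg [a] = [a] := by simp [coreSeg]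

theorem coreSeg_cons_append (a b : Int) (t : List Int) :
    coreSeg (a :: (t ++ [b])) = b :: a :: coreSeg t := by
  rw [coreSeg]
  simp

-- A's loop on indices [l, r] equals coreSeg of that segment of s.
theorem aLoop_eq_coreSeg (s : List Int) :
    ∀ (k : Nat) (l r : Int), 0 ≤ l → r < s.length → (r + 1 - l).toNat = k →
      alternateSortLoop s l r = coreSeg ((s.drop l.toNat).take k) := by
  intro k
  induction k using Nat.strong_induction_on with
  | _ k ih =>
    intro l r hl hr hk
    rw [alternateSortLoop]
    by_cases hle : l ≤ r
    · simp only [dif_pos hle]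
      have hL : l.toNat < s.length := by omega
      have hdrop : s.drop l.toNat = s[l.toNat] :: s.drop (l.toNat + 1) :=
        List.drop_eq_getElem_cons hL
      by_cases heq : l = r
      · have hk1 : k = 1 := by omega
        subst hk1 heq
        rw [if_neg (show ¬ l ≠ l from by omega)]
        rw [hdrop]
        rw [PySem.List.pyGetD_eq_getElem s 0 hl (by omega)]
        rw [List.take_cons, List.take_zero, coreSeg_single]
        omega
      · simp only [if_pos heq]
        obtain ⟨j, rfl⟩ : ∃ j, k = j + 2 := ⟨k - 2, by omega⟩
        have hnat : (l + 1).toNat = l.toNat + 1 := by omega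
        have ihs := ih j (by omega) (l + 1) (r - 1) (by omega) (by omega) (by omega)
        rw [hnat] at ihs
        rw [ihs]
        have hR : r.toNat < s.length := by omega
        have hlen : j < (s.drop (l.toNat + 1)).length := by
          rw [List.length_drop]; omega
        have hget2 : (s.drop (l.toNat + 1))[j]? = some s[r.toNat] := by
          rw [List.getElem?_eq_getElem hlen]
          congr 1
          rw [List.getElem_drop]
          congr 1
          omega
        have hseg : (s.drop l.toNat).take (j + 2) =
            s[l.toNat] :: (((s.drop (l.toNat + 1)).take j) ++ [s[r.toNat]]) := by
          rw [hdrop, List.take_succ_cons, List.take_add_one, hget2]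
          simp
        rw [hseg, coreSeg_cons_append]
        rw [PySem.List.pyGetD_eq_getElem s 0 (by omega) (by omega),
            PySem.List.pyGetD_eq_getElem s 0 hl (by omega)]
    · simp only [dif_neg hle]
      have : k = 0 := by omega
      subst this
      simp [coreSeg_nil]

-- B's interleave in Nat terms.
def bCore (s : List Int) : List Int :=
  ((s.drop (s.length - s.length / 2)).reverse.zip (s.take (s.length / 2))).flatMap
      (fun p => [p.1, p.2]) ++
    (if s.length % 2 = 1 then [s.getD (s.length / 2) 0] else [])

theorem coreSeg_eq_bCore : ∀ s : List Int, coreSeg s = bCore s := by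
  intro s
  induction s using List.bidirectionalRec with
  | nil => rw [coreSeg_nil]; rfl
  | singleton a => rw [coreSeg_single]; simp [bCore]
  | cons_append a t b ih =>
    rw [coreSeg_cons_append, ih]
    unfold bCore
    have hm2 : (a :: (t ++ [b])).length = t.length + 2 := by simp
    rw [hm2]
    generalize hm : t.length = m
    have hh : (m + 2) / 2 = m / 2 + 1 := by omega
    rw [hh]
    have htake : (a :: (t ++ [b])).take (m / 2 + 1) = a :: t.take (m / 2) := by
      rw [List.take_succ_cons, List.take_append_of_le_length (by omega)]
    have hdropn : m + 2 - (m / 2 + 1) = (m - m / 2) + 1 := by omega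
    have hdrop : (a :: (t ++ [b])).drop ((m - m / 2) + 1) = t.drop (m - m / 2) ++ [b] := by
      rw [List.drop_succ_cons, List.drop_append_of_le_length (by omega)]
    rw [htake, hdropn, hdrop]
    simp only [List.reverse_append, List.reverse_cons, List.reverse_nil, List.nil_append,
      List.singleton_append, List.zip_cons_cons, List.flatMap_cons]
    have hpar : (m + 2) % 2 = m % 2 := by omega
    rw [hpar]
    by_cases hodd : m % 2 = 1
    · simp only [hodd]
      have hmid : (a :: (t ++ [b])).getD (m / 2 + 1) 0 = t.getD (m / 2) 0 := by
        have hlt : m / 2 < t.length := by omega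
        simp only [List.getD, List.getElem?_cons_succ, List.getElem?_append_left hlt]
      rw [hmid]
      simp
    · simp [hodd]

-- foldl-append over pairs is flatMap.
theorem foldl_pairs_eq_flatMap (ps : List (Int × Int)) (acc : List Int) :
    ps.foldl (fun acc p => acc ++ [p.1, p.2]) acc = acc ++ ps.flatMap (fun p => [p.1, p.2]) := by
  induction ps generalizing acc with
  | nil => simp
  | cons p ps ih => simp [List.foldl_cons, ih]

-- ===== VERDICT (by name: the statement is the Claim_ definition above) =====
theorem alternateSort_spec : Claim_equal_alternateSort := by
  intro arr _
  unfold Spec_alternateSort alternateSort alternateSort_alt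
  simp only []
  set s := PySem.List.sorted arr (fun x => x) false with hs
  have hlen : arr.length = s.length := (PySem.List.length_sorted arr (fun x => x) false).symm
  rw [hlen]
  have hA : alternateSortLoop s 0 ((s.length : Int) - 1) = coreSeg s := by
    have := aLoop_eq_coreSeg s s.length 0 ((s.length : Int) - 1) le_rfl (by omega) (by omega)
    simpa using this
  rw [hA, coreSeg_eq_bCore]
  unfold bCore
  have hfd : PySem.Int.floordiv (s.length : Int) 2 = ((s.length / 2 : Nat) : Int) := by
    exact_mod_cast PySem.Int.floordiv_natCast s.length 2
  have hsub : (s.length : Int) - ((s.length / 2 : Nat) : Int) = ((s.length - s.length / 2 : Nat) : Int) := by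
    have : s.length / 2 ≤ s.length := Nat.div_le_self _ _
    push_cast [this]
    ring
  rw [hfd, hsub, PySem.List.slice_to_natCast, PySem.List.slice_from_natCast]
  have hmod : PySem.Int.mod (s.length : Int) 2 = ((s.length % 2 : Nat) : Int) := by
    exact_mod_cast PySem.Int.mod_natCast s.length 2
  rw [hmod, foldl_pairs_eq_flatMap]
  simp only [List.nil_append, PySem.List.pyGetD_natCast]
  by_cases hodd : s.length % 2 = 1
  · simp [hodd]
  · simp [hodd]
    omega
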